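-- pv_equiv track=rewrite | github.com/abhinavabcd/blaster | blaster/tools/__init__.py | NON_NULL_DICT
-- ===== SOURCE A (Python) =====
-- def NON_NULL_DICT(kv):
-- 	has_null_values = False
-- 	for k, v in kv.items():
-- 		if v is None:
-- 			has_null_values = True
-- 			break
-- 	if has_null_values:
-- 		return {k: v for k, v in kv.items() if v is not None}
-- 	return kv
-- ===== SOURCE B (Python) =====
-- def NON_NULL_DICT(kv):
-- 	out = dict(kv)
-- 	for k in [k for k, v in kv.items() if v is None]:
-- 		del out[k]
-- 	return out
-- ===== Notes on version B (the rewrite author's own statement) =====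
-- stated objective: alternative
-- what changed: A detects a None with an early-exit scan and then conditionally rebuilds the dict by selecting the non-None entries; B works subtractively: it copies the dict and deletes the None-valued keys from the copy, never scanning for whether a rebuild is needed.
import Mathlib
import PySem

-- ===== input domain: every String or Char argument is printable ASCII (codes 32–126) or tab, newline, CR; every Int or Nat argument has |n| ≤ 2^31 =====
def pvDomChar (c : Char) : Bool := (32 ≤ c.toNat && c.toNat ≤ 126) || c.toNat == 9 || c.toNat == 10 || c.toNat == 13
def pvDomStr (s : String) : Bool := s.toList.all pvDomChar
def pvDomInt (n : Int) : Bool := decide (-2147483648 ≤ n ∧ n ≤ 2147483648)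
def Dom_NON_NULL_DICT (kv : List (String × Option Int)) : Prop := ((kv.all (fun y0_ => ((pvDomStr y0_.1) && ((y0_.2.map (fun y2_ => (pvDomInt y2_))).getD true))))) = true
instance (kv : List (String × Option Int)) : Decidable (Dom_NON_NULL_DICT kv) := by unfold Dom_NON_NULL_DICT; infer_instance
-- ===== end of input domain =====

-- B is subtractive: copy the dict and delete the None-valued keys from the copy (no detection scan, no conditional identity return); return-value equivalence only (Python A may return the identical dict object when no None is present).

-- ===== PORT A =====
-- early-exit scan for a None value (A's 'for … break' loop)
def pvHasNull : List (String × Option Int) → Bool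
  | [] => false
  | (_, v) :: rest => if v = none then true else pvHasNull rest

def NON_NULL_DICT (kv : List (String × Option Int)) : List (String × Option Int) :=
  if pvHasNull kv then kv.filter (fun p => p.2.isSome) else kv

-- ===== PORT B =====
-- 'del out[k]': remove the first entry with key k (exact here: a Python dict has unique keys, and B only deletes keys that are present)
def pvDel (d : List (String × Option Int)) (k : String) : List (String × Option Int) :=
  match d with
  | [] => []
  | p :: rest => if p.1 = k then rest else p :: pvDel rest k

def NON_NULL_DICT_alt (kv : List (String × Option Int)) : List (String × Option Int) :=
  ((kv.filter (fun p => p.2.isNone)).map Prod.fst).foldl pvDel kv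

-- ===== PRECONDITION & SPEC =====
-- Pre_ excludes lists with duplicate keys: no Python dict is represented by such a list, so A never receives one.
def Pre_NON_NULL_DICT (kv : List (String × Option Int)) : Prop := (kv.map Prod.fst).Nodup
instance (kv : List (String × Option Int)) : Decidable (Pre_NON_NULL_DICT kv) := by unfold Pre_NON_NULL_DICT; infer_instance
def pvWitness_NON_NULL_DICT : (List (String × Option Int)) := [("a", some 1), ("b", none)]
def Spec_NON_NULL_DICT (kv : List (String × Option Int)) (out : List (String × Option Int)) : Prop := out = NON_NULL_DICT_alt kv
instance (kv : List (String × Option Int)) (out : List (String × Option Int)) : Decidable (Spec_NON_NULL_DICT kv out) := by unfold Spec_NON_NULL_DICT; infer_instance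

-- ===== CLAIM =====
def Claim_equal_NON_NULL_DICT : Prop := ∀ (kv : List (String × Option Int)), Dom_NON_NULL_DICT kv → Pre_NON_NULL_DICT kv → Spec_NON_NULL_DICT kv (NON_NULL_DICT kv)

-- ===== LEMMAS AND PROOFS =====
-- when the keys are distinct, deleting the first occurrence of k deletes every entry keyed k
theorem pvDel_eq_filter (d : List (String × Option Int)) (k : String)
    (h : (d.map Prod.fst).Nodup) :
    pvDel d k = d.filter (fun p => decide (p.1 ≠ k)) := by
  induction d with
  | nil => rfl
  | cons hd tl ih =>
    simp only [List.map_cons, List.nodup_cons] at h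
    rw [pvDel, List.filter_cons]
    by_cases hk : hd.1 = k
    · subst hk
      simp only [if_pos rfl, ne_eq, not_true_eq_false, decide_false, Bool.false_eq_true,
        if_false]
      -- hd.1 ∉ tl keys ⟹ filter removes nothing
      symm
      refine List.filter_eq_self.mpr ?_
      intro p hp
      simp only [ne_eq, decide_eq_true_eq]
      intro hpk
      exact h.1 (hpk ▸ List.mem_map_of_mem hp)
    · simp [hk, ih h.2]

theorem foldl_pvDel_eq_filter (ks : List String) (d : List (String × Option Int))
    (h : (d.map Prod.fst).Nodup) :
    ks.foldl pvDel d = d.filter (fun p => decide (p.1 ∉ ks)) := by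
  induction ks generalizing d with
  | nil => simp
  | cons k ks ih =>
    rw [List.foldl_cons, pvDel_eq_filter d k h]
    have hnd : ((d.filter (fun p => decide (p.1 ≠ k))).map Prod.fst).Nodup :=
      ((List.filter_sublist (l := d)).map Prod.fst).nodup h
    rw [ih _ hnd, List.filter_filter]
    refine List.filter_congr ?_
    intro p _
    simp only [List.mem_cons, not_or]
    by_cases h1 : p.1 = k <;> by_cases h2 : p.1 ∈ ks <;> simp [h1, h2]

theorem pvHasNull_false_filter (kv : List (String × Option Int)) (h : pvHasNull kv = false) :
    kv.filter (fun p => p.2.isSome) = kv := by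
  induction kv with
  | nil => rfl
  | cons hd tl ih =>
    simp only [pvHasNull, Bool.if_true_left] at h
    rw [List.filter_cons]
    have h1 : hd.2 ≠ none := by intro hn; simp [hn] at h
    have h2 : pvHasNull tl = false := by
      by_cases hn : hd.2 = none
      · exact absurd hn h1
      · simpa [hn] using h
    simp [Option.isSome_iff_ne_none, h1, ih h2]

theorem alt_eq_filter (kv : List (String × Option Int)) (h : (kv.map Prod.fst).Nodup) :
    NON_NULL_DICT_alt kv = kv.filter (fun p => p.2.isSome) := by
  unfold NON_NULL_DICT_alt
  rw [foldl_pvDel_eq_filter _ _ h]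
  refine List.filter_congr ?_
  intro p hp
  rw [Bool.eq_iff_iff]
  simp only [Bool.not_eq_true', decide_eq_false_iff_not, List.mem_map, List.mem_filter,
    Option.isSome_iff_ne_none, ne_eq, decide_not]
  constructor
  · -- p.1 not among the None keys ⟹ p.2 is some
    intro hnot
    simp only [not_exists, not_and] at hnot
    cases hv : p.2 with
    | none =>
      exact absurd rfl (hnot p ⟨hp, by simp [hv]⟩)
    | some x => simp
  · -- p.2 is some ⟹ p.1 not a None key (keys distinct)
    intro hs hex
    obtain ⟨q, ⟨hq, hqnone⟩, hqk⟩ := hex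
    have : q = p := List.inj_on_of_nodup_map h hq hp hqk
    subst this
    simp [Option.isNone_iff_eq_none.mp hqnone] at hs

-- ===== VERDICT =====
theorem NON_NULL_DICT_spec : Claim_equal_NON_NULL_DICT := by
  intro kv _ hpre
  unfold Spec_NON_NULL_DICT NON_NULL_DICT
  rw [alt_eq_filter kv hpre]
  by_cases h : pvHasNull kv = true
  · simp [h]
  · simp at h
    simp [h, pvHasNull_false_filter kv h]
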